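-- pv_equiv track=rewrite | github.com/DIRACGrid/DIRAC | AccountingSystem/private/DBUtils.py | _accumulate
-- ===== SOURCE A (Python) =====
-- def _accumulate( granularity, startEpoch, endEpoch, dataDict ):
--   """
--   Accumulate all the values.
--     - dataDict = { 'key' : { time1 : value,  time2 : value... }, 'key2'.. }
--   """
--   startBucketEpoch = startEpoch - startEpoch % granularity
--   for key in dataDict:
--     currentDict = dataDict[ key ]
--     lastValue = 0
--     for timeEpoch in range( startBucketEpoch, endEpoch, granularity ):
--       if timeEpoch in currentDict:
--         lastValue += currentDict[ timeEpoch ]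
--       currentDict[ timeEpoch ] = lastValue
--   return dataDict
-- ===== SOURCE B (Python) =====
-- def _accumulate(granularity, startEpoch, endEpoch, dataDict):
--     # Per-bucket closed form: each bucket's value is the sum of the original
--     # entries whose epoch is an in-range bucket with index <= this bucket's index,
--     # found by divmod arithmetic on a snapshot -- no running accumulator, no
--     # membership tests against the dict. Mutates the inner dicts in place like A.
--     start = startEpoch - startEpoch % granularity
--     buckets = range(start, endEpoch, granularity)
--     m = len(buckets)
--     for currentDict in dataDict.values():
--         contrib = []
--         for epoch, v in list(currentDict.items()):
--             q = (epoch - start) // granularity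
--             r = (epoch - start) % granularity
--             if r == 0 and 0 <= q < m:
--                 contrib.append((q, v))
--         for i, t in enumerate(buckets):
--             currentDict[t] = sum(v for q, v in contrib if q <= i)
--     return dataDict
-- ===== Notes on version B (the rewrite author's own statement) =====
-- stated objective: alternative
-- what changed: Replaces A's running accumulator with per-bucket closed-form aggregation: B maps each snapshotted dict entry to a bucket index by divmod arithmetic (no dict membership tests, no carried lastValue) and writes each bucket independently as the sum of contributions with index <= the bucket's index.
import Mathlib
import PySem

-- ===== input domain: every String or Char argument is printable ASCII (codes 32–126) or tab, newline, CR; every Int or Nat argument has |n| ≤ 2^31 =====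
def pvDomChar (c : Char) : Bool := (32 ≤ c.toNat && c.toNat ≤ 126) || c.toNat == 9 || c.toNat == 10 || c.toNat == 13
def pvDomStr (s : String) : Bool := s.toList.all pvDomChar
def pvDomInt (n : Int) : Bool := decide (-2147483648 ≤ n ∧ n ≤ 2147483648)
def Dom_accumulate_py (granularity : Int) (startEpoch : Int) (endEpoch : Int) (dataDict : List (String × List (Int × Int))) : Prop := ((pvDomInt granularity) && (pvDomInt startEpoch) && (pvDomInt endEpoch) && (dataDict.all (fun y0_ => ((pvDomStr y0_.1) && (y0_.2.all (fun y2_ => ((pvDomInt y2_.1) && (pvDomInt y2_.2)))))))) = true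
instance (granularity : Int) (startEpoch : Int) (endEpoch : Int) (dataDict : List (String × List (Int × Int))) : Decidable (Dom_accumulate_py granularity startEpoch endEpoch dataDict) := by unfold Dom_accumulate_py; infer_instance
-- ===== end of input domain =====

-- B computes every bucket independently as a closed-form sum of snapshotted entries mapped to bucket
-- indices by divmod arithmetic, instead of A's running accumulator with dict-membership tests;
-- objective: alternative. Both A and B mutate the inner dicts in place identically and return dataDict.

-- ===== PORT A =====
-- one step of A's inner loop, carrying (currentDict, lastValue);
-- 'if timeEpoch in currentDict: lastValue += currentDict[timeEpoch]' — the getD is guarded by contains, so it is exactly currentDict[timeEpoch]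
def accAstep (st : PySem.Dict Int Int × Int) (t : Int) : PySem.Dict Int Int × Int :=
  let last := if st.1.contains t then st.2 + st.1.getD t 0 else st.2
  (st.1.insert t last, last)

def accumulate_py (granularity : Int) (startEpoch : Int) (endEpoch : Int) (dataDict : List (String × List (Int × Int))) : List (String × List (Int × Int)) :=
  let startBucketEpoch := startEpoch - PySem.Int.mod startEpoch granularity
  dataDict.map (fun kv =>
    let cur := PySem.Dict.mk kv.2
    (kv.1, ((PySem.List.pyRange startBucketEpoch endEpoch granularity).foldl accAstep (cur, 0)).1.items))

-- ===== PORT B =====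
def accumulate_py_alt (granularity : Int) (startEpoch : Int) (endEpoch : Int) (dataDict : List (String × List (Int × Int))) : List (String × List (Int × Int)) :=
  let start := startEpoch - PySem.Int.mod startEpoch granularity
  let buckets := PySem.List.pyRange start endEpoch granularity
  let m : Int := (buckets.length : Int)
  dataDict.map (fun kv =>
    let cur := PySem.Dict.mk kv.2
    let contrib := cur.items.foldl (fun (acc : List (Int × Int)) p =>
        let q := PySem.Int.floordiv (p.1 - start) granularity
        let r := PySem.Int.mod (p.1 - start) granularity
        if r = 0 ∧ 0 ≤ q ∧ q < m then acc ++ [(q, p.2)] else acc) []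
    (kv.1, ((PySem.List.enumerate buckets).foldl
        (fun (d : PySem.Dict Int Int) (it : Int × Int) =>
          d.insert it.2 (contrib.foldl (fun (t : Int) qv => if qv.1 ≤ it.1 then t + qv.2 else t) 0)) cur).items))

-- ===== PRECONDITION & SPEC =====
-- granularity = 0 makes Python raise ZeroDivisionError on 'startEpoch % granularity' (both A and B).
-- Inner lists with duplicate keys are excluded because they do not represent a Python dict (the inner
-- dicts Python A receives have unique keys by construction), so A is never called on such an input.
def Pre_accumulate_py (granularity : Int) (startEpoch : Int) (endEpoch : Int) (dataDict : List (String × List (Int × Int))) : Prop :=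
  granularity ≠ 0 ∧ ∀ kv ∈ dataDict, (kv.2.map Prod.fst).Nodup
instance (granularity : Int) (startEpoch : Int) (endEpoch : Int) (dataDict : List (String × List (Int × Int))) : Decidable (Pre_accumulate_py granularity startEpoch endEpoch dataDict) := by unfold Pre_accumulate_py; infer_instance
def pvWitness_accumulate_py : Int × Int × Int × (List (String × List (Int × Int))) := (2, 1, 6, [("a", [(2, 3), (5, 1)])])

def Spec_accumulate_py (granularity : Int) (startEpoch : Int) (endEpoch : Int) (dataDict : List (String × List (Int × Int))) (out : List (String × List (Int × Int))) : Prop := out = accumulate_py_alt granularity startEpoch endEpoch dataDict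
instance (granularity : Int) (startEpoch : Int) (endEpoch : Int) (dataDict : List (String × List (Int × Int))) (out : List (String × List (Int × Int))) : Decidable (Spec_accumulate_py granularity startEpoch endEpoch dataDict out) := by unfold Spec_accumulate_py; infer_instance

-- ===== CLAIM (what is proved, stated in full; the proofs are below) =====
def Claim_equal_accumulate_py : Prop := ∀ (granularity : Int) (startEpoch : Int) (endEpoch : Int) (dataDict : List (String × List (Int × Int))), Dom_accumulate_py granularity startEpoch endEpoch dataDict → Pre_accumulate_py granularity startEpoch endEpoch dataDict → Spec_accumulate_py granularity startEpoch endEpoch dataDict (accumulate_py granularity startEpoch endEpoch dataDict)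

-- ===== LEMMAS AND PROOFS =====

-- running totals with an explicit seed (proof-side characterisation of A's lastValue stream)
def accum (s : Int) : List Int → List Int
  | [] => []
  | x :: xs => (s + x) :: accum (s + x) xs

-- first-match association lookup with default 0 (proof-side reading of Dict getD on raw items)
def lkp : List (Int × Int) → Int → Int
  | [], _ => 0
  | p :: rest, t => if p.1 = t then p.2 else lkp rest t

lemma lkp_mk (l : List (Int × Int)) (t : Int) : (PySem.Dict.mk l).getD t 0 = lkp l t := by
  induction l with
  | nil => simp [lkp, PySem.Dict.getD, PySem.Dict.get?]
  | cons p rest ih =>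
    rw [PySem.Dict.getD_eq_get?_getD, PySem.Dict.get?_mk_cons]
    by_cases h : p.1 = t
    · simp [lkp, h]
    · have hb : (p.1 == t) = false := by simp [h]
      simp only [hb, Bool.false_eq_true, if_false, lkp, h, if_false]
      rw [← PySem.Dict.getD_eq_get?_getD]
      exact ih

lemma lkp_not_mem (l : List (Int × Int)) (t : Int) (h : t ∉ l.map Prod.fst) : lkp l t = 0 := by
  induction l with
  | nil => rfl
  | cons p rest ih =>
    simp only [List.map_cons, List.mem_cons, not_or] at h
    have hne : p.1 ≠ t := fun hh => h.1 hh.symm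
    simp [lkp, hne, ih h.2]

-- A's inner loop equals inserting the running totals bucket by bucket (r nodup)
lemma inner_eq (r : List Int) (hr : r.Nodup) (d : PySem.Dict Int Int) (last : Int) :
    (r.foldl accAstep (d, last)).1
      = (r.zip (accum last (r.map (fun t => d.getD t 0)))).foldl
          (fun d (p : Int × Int) => d.insert p.1 p.2) d := by
  induction r generalizing d last with
  | nil => rfl
  | cons t r ih =>
    rcases List.nodup_cons.mp hr with ⟨ht, hr'⟩
    have hstep : accAstep (d, last) t = (d.insert t (last + d.getD t 0), last + d.getD t 0) := by
      unfold accAstep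
      by_cases hc : d.contains t
      · simp [hc]
      · have hc' : d.contains t = false := by simpa using hc
        simp [hc', PySem.Dict.getD_of_not_contains d 0 hc']
    have hmap : r.map (fun s => (d.insert t (last + d.getD t 0)).getD s 0)
        = r.map (fun s => d.getD s 0) := by
      apply List.map_congr_left
      intro s hs
      have hne : s ≠ t := fun h => ht (h ▸ hs)
      simp [PySem.Dict.getD_insert, hne]
    simp only [List.foldl_cons, hstep, List.map_cons, accum, List.zip_cons_cons]
    rw [ih hr' (d.insert t (last + d.getD t 0)) (last + d.getD t 0), hmap]

-- pyRange with nonzero step is an arithmetic progression over List.range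
lemma pyRange_shape (a b s : Int) (hs : s ≠ 0) :
    PySem.List.pyRange a b s
      = (List.range (PySem.List.pyRange a b s).length).map (fun (k : Nat) => a + s * (k : Int)) := by
  rcases lt_or_gt_of_ne hs with h | h
  · rw [PySem.List.pyRange_of_neg a b h]; simp
  · rw [PySem.List.pyRange_of_pos a b h]; simp

lemma nodup_pyRange_ne_zero (a b s : Int) (hs : s ≠ 0) : (PySem.List.pyRange a b s).Nodup := by
  rw [pyRange_shape a b s hs]
  apply List.Nodup.map _ List.nodup_range
  intro k1 k2 h
  have h2 : s * (k1 : Int) = s * (k2 : Int) := by linarith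
  exact_mod_cast mul_left_cancel₀ hs h2

lemma accum_char (s : Int) (l : List Int) :
    accum s l = (List.range l.length).map (fun i => s + (l.take (i + 1)).sum) := by
  induction l generalizing s with
  | nil => simp [accum]
  | cons x xs ih =>
    simp only [accum, ih, List.length_cons, List.range_succ_eq_map, List.map_cons, List.map_map]
    congr 1
    · simp
    · apply List.map_congr_left
      intro i _
      simp [Function.comp, List.take_succ_cons, add_assoc]

-- the sum-loop over contrib is the seed plus the sum of the filtered values
lemma foldl_if_add (c : List (Int × Int)) (i t0 : Int) :
    c.foldl (fun (t : Int) qv => if qv.1 ≤ i then t + qv.2 else t) t0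
      = t0 + ((c.filter (fun qv => decide (qv.1 ≤ i))).map (·.2)).sum := by
  induction c generalizing t0 with
  | nil => simp
  | cons p rest ih =>
    by_cases h : p.1 ≤ i
    · simp [h, ih, add_assoc]
    · simp [h, ih]

-- arithmetic: membership of an epoch in the bucket progression, by divmod
lemma bucket_index (a s c : Int) (hs : s ≠ 0) (j : Nat) :
    a + s * (j : Int) = c
      ↔ (PySem.Int.mod (c - a) s = 0 ∧ PySem.Int.floordiv (c - a) s = (j : Int)) := by
  constructor
  · intro h
    have hdvd : s ∣ (c - a) := ⟨(j : Int), by omega⟩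
    have hm : PySem.Int.mod (c - a) s = 0 := (PySem.Int.mod_eq_zero_iff_dvd _ _).mpr hdvd
    refine ⟨hm, ?_⟩
    have hfm := PySem.Int.floordiv_mul_add_mod (c - a) s
    rw [hm, add_zero] at hfm
    have h2 : PySem.Int.floordiv (c - a) s * s = (j : Int) * s := by
      rw [hfm]; linarith [mul_comm s ((j : Int))]
    exact mul_right_cancel₀ hs h2
  · rintro ⟨hm, hf⟩
    have hfm := PySem.Int.floordiv_mul_add_mod (c - a) s
    rw [hm, add_zero, hf] at hfm
    linarith [mul_comm ((j : Int)) s]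

-- key sum: over the first k+1 buckets, the single-key indicator sums to that key's contribution
lemma single_key_sum (a s : Int) (hs : s ≠ 0) (N k : Nat) (hk : k < N) (c v : Int) :
    (((List.range (k + 1)).map (fun (j : Nat) => if a + s * (j : Int) = c then v else 0)).sum)
      = (if PySem.Int.mod (c - a) s = 0 ∧ 0 ≤ PySem.Int.floordiv (c - a) s
            ∧ PySem.Int.floordiv (c - a) s < (N : Int) ∧ PySem.Int.floordiv (c - a) s ≤ (k : Int)
         then v else 0) := by
  have hbridge : ((List.range (k + 1)).map (fun (j : Nat) => if a + s * (j : Int) = c then v else 0)).sum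
      = ∑ j ∈ Finset.range (k + 1), (if a + s * (j : Int) = c then v else 0) := rfl
  rw [hbridge]
  by_cases hC : PySem.Int.mod (c - a) s = 0 ∧ 0 ≤ PySem.Int.floordiv (c - a) s
      ∧ PySem.Int.floordiv (c - a) s < (N : Int) ∧ PySem.Int.floordiv (c - a) s ≤ (k : Int)
  · obtain ⟨hm, h0, hN, hkk⟩ := hC
    have hcond : ∀ j : Nat, (a + s * (j : Int) = c) ↔ j = (PySem.Int.floordiv (c - a) s).toNat := by
      intro j
      rw [bucket_index a s c hs j]
      constructor
      · rintro ⟨-, hf⟩; omega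
      · rintro rfl; exact ⟨hm, by omega⟩
    rw [if_pos ⟨hm, h0, hN, hkk⟩]
    calc (∑ j ∈ Finset.range (k + 1), if a + s * (j : Int) = c then v else 0)
        = ∑ j ∈ Finset.range (k + 1),
            if j = (PySem.Int.floordiv (c - a) s).toNat then v else 0 := by
          refine Finset.sum_congr rfl fun j _ => ?_
          rw [if_congr (hcond j) rfl rfl]
      _ = if (PySem.Int.floordiv (c - a) s).toNat ∈ Finset.range (k + 1) then v else 0 :=
          Finset.sum_ite_eq' (Finset.range (k + 1)) _ (fun _ => v)
      _ = v := by rw [if_pos (Finset.mem_range.mpr (by omega))]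
  · rw [if_neg hC]
    refine Finset.sum_eq_zero fun j hj => ?_
    rw [if_neg]
    intro h
    rcases (bucket_index a s c hs j).mp h with ⟨hm, hf⟩
    exact hC ⟨hm, by omega, by simp only [Finset.mem_range] at hj; omega, by
      simp only [Finset.mem_range] at hj; omega⟩

-- main per-bucket value equality: the filtered contribution sum is the sum of lookups over the buckets
lemma contrib_sum_eq (a s : Int) (hs : s ≠ 0) (N : Nat) (items : List (Int × Int))
    (hnd : (items.map Prod.fst).Nodup) (k : Nat) (hk : k < N) :
    ((((items.filter (fun p => decide (PySem.Int.mod (p.1 - a) s = 0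
            ∧ 0 ≤ PySem.Int.floordiv (p.1 - a) s
            ∧ PySem.Int.floordiv (p.1 - a) s < (N : Int)))).map
          (fun p => (PySem.Int.floordiv (p.1 - a) s, p.2))).filter
        (fun qv => decide (qv.1 ≤ (k : Int)))).map (·.2)).sum
      = ((List.range (k + 1)).map (fun (j : Nat) => lkp items (a + s * (j : Int)))).sum := by
  induction items with
  | nil => simp [lkp]
  | cons p rest ih =>
    simp only [List.map_cons, List.nodup_cons] at hnd
    have hpn : p.1 ∉ rest.map Prod.fst := hnd.1
    have ihr := ih hnd.2
    have hpoint : ∀ j : Nat, lkp (p :: rest) (a + s * (j : Int))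
        = (if a + s * (j : Int) = p.1 then p.2 else 0) + lkp rest (a + s * (j : Int)) := by
      intro j
      by_cases h : p.1 = a + s * (j : Int)
      · rw [lkp, if_pos h, if_pos h.symm, ← h, lkp_not_mem rest p.1 hpn, add_zero]
      · rw [lkp, if_neg h, if_neg (fun hh => h hh.symm), zero_add]
    have hsplit : ((List.range (k + 1)).map (fun (j : Nat) => lkp (p :: rest) (a + s * (j : Int)))).sum
        = ((List.range (k + 1)).map (fun (j : Nat) => if a + s * (j : Int) = p.1 then p.2 else 0)).sum
          + ((List.range (k + 1)).map (fun (j : Nat) => lkp rest (a + s * (j : Int)))).sum := by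
      rw [← PySem.List.sum_map_add_int]
      exact congrArg List.sum (List.map_congr_left fun j _ => hpoint j)
    rw [hsplit, ← ihr, single_key_sum a s hs N k hk p.1 p.2]
    by_cases hc : PySem.Int.mod (p.1 - a) s = 0 ∧ 0 ≤ PySem.Int.floordiv (p.1 - a) s
        ∧ PySem.Int.floordiv (p.1 - a) s < (N : Int)
    · rw [List.filter_cons_of_pos (by simpa using hc), List.map_cons]
      by_cases hk2 : PySem.Int.floordiv (p.1 - a) s ≤ (k : Int)
      · rw [if_pos ⟨hc.1, hc.2.1, hc.2.2, hk2⟩,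
          List.filter_cons_of_pos (by simpa using hk2), List.map_cons, List.sum_cons]
      · rw [if_neg (fun h => hk2 h.2.2.2),
          List.filter_cons_of_neg (by simpa using hk2), zero_add]
    · rw [if_neg (fun h => hc ⟨h.1, h.2.1, h.2.2.1⟩),
        List.filter_cons_of_neg (by simpa using hc), zero_add]

-- enumerate of a mapped range
lemma enumerate_map_range (g : Nat → Int) (N : Nat) (s : Int) :
    PySem.List.enumerate ((List.range N).map g) s
      = (List.range N).map (fun (k : Nat) => ((s + (k : Int), g k) : Int × Int)) := by
  induction N with
  | zero => simp
  | succ n ih =>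
    rw [List.range_succ, List.map_append, PySem.List.enumerate_append, ih, List.map_append]
    simp

-- per-key equality: A's fused loop and B's per-bucket closed-form writes build the same dict
lemma per_key (g a e : Int) (hg : g ≠ 0) (items : List (Int × Int))
    (hnd : (items.map Prod.fst).Nodup) :
    ((PySem.List.pyRange a e g).foldl accAstep (PySem.Dict.mk items, 0)).1
      = (PySem.List.enumerate (PySem.List.pyRange a e g)).foldl
          (fun (d : PySem.Dict Int Int) (it : Int × Int) =>
            d.insert it.2 ((items.foldl (fun (acc : List (Int × Int)) p =>
                if PySem.Int.mod (p.1 - a) g = 0 ∧ 0 ≤ PySem.Int.floordiv (p.1 - a) g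
                    ∧ PySem.Int.floordiv (p.1 - a) g
                        < (((PySem.List.pyRange a e g).length : Nat) : Int)
                then acc ++ [(PySem.Int.floordiv (p.1 - a) g, p.2)] else acc) []).foldl
              (fun (t : Int) qv => if qv.1 ≤ it.1 then t + qv.2 else t) 0))
          (PySem.Dict.mk items) := by

  have hrs := pyRange_shape a e g hg
  set r := PySem.List.pyRange a e g with hr
  set N := r.length with hN
  set f : Int → Int := fun t => (PySem.Dict.mk items).getD t 0 with hf
  -- the contrib-building loop is a filter-and-map
  have hcontrib : (items.foldl (fun (acc : List (Int × Int)) p =>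
      if PySem.Int.mod (p.1 - a) g = 0 ∧ 0 ≤ PySem.Int.floordiv (p.1 - a) g
          ∧ PySem.Int.floordiv (p.1 - a) g < ((N : Nat) : Int)
      then acc ++ [(PySem.Int.floordiv (p.1 - a) g, p.2)] else acc) [])
      = (items.filter (fun (p : Int × Int) => decide (PySem.Int.mod (p.1 - a) g = 0
            ∧ 0 ≤ PySem.Int.floordiv (p.1 - a) g
            ∧ PySem.Int.floordiv (p.1 - a) g < ((N : Nat) : Int)))).map
          (fun (p : Int × Int) => (PySem.Int.floordiv (p.1 - a) g, p.2)) := by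
    have hfun : (fun (acc : List (Int × Int)) p =>
        if PySem.Int.mod (p.1 - a) g = 0 ∧ 0 ≤ PySem.Int.floordiv (p.1 - a) g
            ∧ PySem.Int.floordiv (p.1 - a) g < ((N : Nat) : Int)
        then acc ++ [(PySem.Int.floordiv (p.1 - a) g, p.2)] else acc)
        = (fun (acc : List (Int × Int)) p =>
            if (fun (p : Int × Int) => decide (PySem.Int.mod (p.1 - a) g = 0
                ∧ 0 ≤ PySem.Int.floordiv (p.1 - a) g
                ∧ PySem.Int.floordiv (p.1 - a) g < ((N : Nat) : Int))) p = true
            then acc ++ [(fun (p : Int × Int) => (PySem.Int.floordiv (p.1 - a) g, p.2)) p] else acc) := by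
      funext acc p
      simp
    rw [hfun, PySem.List.foldl_append_if]
    rfl
  -- per-bucket values agree
  have hval : ∀ k ∈ List.range N,
      ((List.range (k + 1)).map (fun (j : Nat) => f (a + g * (j : Int)))).sum
        = ((items.filter (fun (p : Int × Int) => decide (PySem.Int.mod (p.1 - a) g = 0
              ∧ 0 ≤ PySem.Int.floordiv (p.1 - a) g
              ∧ PySem.Int.floordiv (p.1 - a) g < ((N : Nat) : Int)))).map
            (fun (p : Int × Int) => (PySem.Int.floordiv (p.1 - a) g, p.2))).foldl
          (fun (t : Int) qv => if qv.1 ≤ (k : Int) then t + qv.2 else t) 0 := by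
    intro k hk
    rw [foldl_if_add, zero_add, contrib_sum_eq a g hg N items hnd k (List.mem_range.mp hk)]
    refine congrArg List.sum (List.map_congr_left fun j _ => ?_)
    exact lkp_mk items (a + g * (j : Int))
  -- A's side: running totals over the bucket progression
  have hA : r.zip (accum 0 (r.map f))
      = (List.range N).map (fun (k : Nat) => ((a + g * (k : Int)),
          ((List.range (k + 1)).map (fun (j : Nat) => f (a + g * (j : Int)))).sum)) := by
    rw [hrs, List.map_map, accum_char]
    simp only [List.length_map, List.length_range]
    rw [List.zip_map']
    refine List.map_congr_left fun k hk => ?_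
    have hkN : k + 1 ≤ N := List.mem_range.mp hk
    rw [← List.map_take, List.take_range, Nat.min_eq_left hkN, zero_add]
    rfl
  -- B's side: enumerate of the bucket progression
  have hB : PySem.List.enumerate r
      = (List.range N).map (fun (k : Nat) => (((k : Nat) : Int), a + g * (k : Int))) := by
    rw [hrs, enumerate_map_range]
    simp
  rw [inner_eq r (nodup_pyRange_ne_zero a e g hg), hcontrib, hA, hB,
    List.foldl_map, List.foldl_map]
  exact PySem.List.foldl_congr_mem _ _ _ _ (fun acc k hk => by rw [hval k hk])

-- ===== VERDICT (by name: the statement is the Claim_ definition above) =====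
theorem accumulate_py_spec : Claim_equal_accumulate_py := by
  intro g s e dd _ hpre
  obtain ⟨hg, hnd⟩ := hpre
  unfold Spec_accumulate_py accumulate_py accumulate_py_alt
  apply List.map_congr_left
  intro kv hkv
  exact congrArg (Prod.mk kv.1)
    (congrArg PySem.Dict.items (per_key g (s - PySem.Int.mod s g) e hg kv.2 (hnd kv hkv)))
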